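-- pv_equiv track=rewrite | github.com/tvami/HSCPbackgroundPred | DataStudies/2DAlpha_CodeV46p8_1Dfrom2DNoExtrapol_ZPrimeTauPrimeOfficial/header.py | ColorCodeSortedIndices
-- ===== SOURCE A (Python) =====
-- def ColorCodeSortedIndices(colors):
--     possible_colors = []
--     for c in colors:
--         if c not in possible_colors:
--             possible_colors.append(c)
--
--     new_color_order = []
--     for c in possible_colors:
--         for idx in [idx for idx,color in enumerate(colors) if color == c]:
--             if idx not in new_color_order:
--                 new_color_order.append(idx)
--     return new_color_order
-- ===== SOURCE B (Python) =====
-- def ColorCodeSortedIndices(colors):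
--     # One pass: group indices by color in a dict (insertion order = first appearance),
--     # then concatenate the groups.
--     groups = {}
--     for i, c in enumerate(colors):
--         groups.setdefault(c, []).append(i)
--     out = []
--     for idxs in groups.values():
--         out += idxs
--     return out
-- ===== Notes on version B (the rewrite author's own statement) =====
-- stated objective: faster
-- what changed: Replaces A's dedup pass plus per-color rescans of enumerate(colors) with membership tests against the growing output by a single grouping pass into a dict of index lists concatenated in insertion order.
import Mathlib
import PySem

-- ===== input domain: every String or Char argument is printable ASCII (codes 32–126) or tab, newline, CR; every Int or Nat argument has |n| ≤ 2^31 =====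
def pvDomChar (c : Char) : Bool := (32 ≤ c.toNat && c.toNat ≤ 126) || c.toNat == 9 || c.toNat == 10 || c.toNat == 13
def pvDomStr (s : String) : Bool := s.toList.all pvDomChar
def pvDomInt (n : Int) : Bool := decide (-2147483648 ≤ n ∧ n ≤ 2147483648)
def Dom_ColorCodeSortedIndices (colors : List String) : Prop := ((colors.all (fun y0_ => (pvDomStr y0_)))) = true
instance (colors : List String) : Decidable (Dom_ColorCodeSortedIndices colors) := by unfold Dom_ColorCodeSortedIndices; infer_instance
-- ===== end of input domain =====

-- B replaces A's dedup pass plus per-color rescans by a single dict-grouping pass; the return values are proved equal.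

-- ===== PORT A =====
def ColorCodeSortedIndices (colors : List String) : List Int :=
  let possible_colors :=
    colors.foldl (fun acc c => if c ∈ acc then acc else acc ++ [c]) []
  possible_colors.foldl (fun out c =>
    (((PySem.List.enumerate colors).filter (fun p => p.2 == c)).map (fun p => p.1)).foldl
      (fun out idx => if idx ∈ out then out else out ++ [idx]) out) []

-- ===== PORT B =====
def ColorCodeSortedIndices_alt (colors : List String) : List Int :=
  let groups : PySem.Dict String (List Int) :=
    (PySem.List.enumerate colors).foldl
      (fun d p => d.modify p.2 [] (fun v => v ++ [p.1])) PySem.Dict.empty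
  (PySem.Dict.values groups).foldl (fun out idxs => out ++ idxs) []

-- ===== PRECONDITION & SPEC =====
def Spec_ColorCodeSortedIndices (colors : List String) (out : List Int) : Prop := out = ColorCodeSortedIndices_alt colors
instance (colors : List String) (out : List Int) : Decidable (Spec_ColorCodeSortedIndices colors out) := by unfold Spec_ColorCodeSortedIndices; infer_instance

-- ===== CLAIM (what is proved, stated in full; the proofs are below) =====
def Claim_equal_ColorCodeSortedIndices : Prop := ∀ (colors : List String), Dom_ColorCodeSortedIndices colors → Spec_ColorCodeSortedIndices colors (ColorCodeSortedIndices colors)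

-- ===== LEMMAS AND PROOFS =====

-- the group of indices holding color c (in increasing order)
def idxsOf (colors : List String) (c : String) : List Int :=
  ((PySem.List.enumerate colors).filter (fun p => p.2 == c)).map (fun p => p.1)

lemma nodup_idxsOf (colors : List String) (c : String) : (idxsOf colors c).Nodup := by
  unfold idxsOf
  refine List.Nodup.map_on ?_ ?_
  · intro p hp q hq hpq
    rw [List.mem_filter, PySem.List.mem_enumerate_iff] at hp hq
    obtain ⟨⟨k, hk, rfl⟩, _⟩ := hp
    obtain ⟨⟨k', hk', rfl⟩, _⟩ := hq
    simp only at hpq ⊢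
    have : k = k' := by omega
    subst this; rfl
  · exact List.Pairwise.imp (fun {a b} h (he : a = b) => lt_irrefl _ (he ▸ h))
      ((PySem.List.pairwise_lt_enumerate colors 0).filter _)

-- an index occurs in the group of only one color
lemma color_det {colors : List String} {c c' : String} {x : Int}
    (hx : x ∈ idxsOf colors c) (hx' : x ∈ idxsOf colors c') : c = c' := by
  unfold idxsOf at hx hx'
  simp only [List.mem_map, List.mem_filter] at hx hx'
  obtain ⟨p, ⟨hp, hpc⟩, hpx⟩ := hx
  obtain ⟨q, ⟨hq, hqc⟩, hqx⟩ := hx'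
  rw [PySem.List.mem_enumerate_iff] at hp hq
  obtain ⟨k, hk, rfl⟩ := hp
  obtain ⟨k', hk', rfl⟩ := hq
  simp at hpx hqx hpc hqc
  subst hpx
  have : k = k' := by omega
  subst this
  rw [← hpc, ← hqc]

-- A's inner loop: appending a fresh nodup block is plain ++
lemma foldl_fresh_append (xs out : List Int) (hnd : xs.Nodup) (hf : ∀ x ∈ xs, x ∉ out) :
    xs.foldl (fun out idx => if idx ∈ out then out else out ++ [idx]) out = out ++ xs := by
  induction xs generalizing out with
  | nil => simp
  | cons x t ih =>
    simp only [List.foldl_cons, if_neg (hf x (by simp))]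
    rw [ih (out ++ [x]) hnd.of_cons]
    · simp
    · intro y hy
      simp only [List.mem_append, List.mem_singleton]
      rintro (h | rfl)
      · exact hf y (by simp [hy]) h
      · exact (List.nodup_cons.mp hnd).1 hy

-- A's outer loop over pairwise-distinct colors is a flatMap
lemma foldl_groups (colors : List String) (cs : List String) (out : List Int)
    (hnd : cs.Nodup) (hf : ∀ c ∈ cs, ∀ x ∈ idxsOf colors c, x ∉ out) :
    cs.foldl (fun out c => (idxsOf colors c).foldl
      (fun out idx => if idx ∈ out then out else out ++ [idx]) out) out
      = out ++ cs.flatMap (idxsOf colors) := by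
  induction cs generalizing out with
  | nil => simp
  | cons c t ih =>
    simp only [List.foldl_cons]
    rw [foldl_fresh_append _ _ (nodup_idxsOf colors c) (hf c (by simp)),
        ih _ hnd.of_cons]
    · simp
    · intro c' hc' x hx
      simp only [List.mem_append]
      rintro (h | h)
      · exact hf c' (by simp [hc']) x hx h
      · exact (List.nodup_cons.mp hnd).1 (color_det hx h ▸ hc')

-- A's first loop is exactly set(colors) kept in first-appearance order
lemma A_port_eq (colors : List String) :
    (colors.foldl (fun acc c => if c ∈ acc then acc else acc ++ [c]) [])
      = PySem.Set.ofList colors := by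
  rw [PySem.Set.ofList_eq_foldl]
  apply PySem.List.foldl_congr_mem
  intro acc x _
  simp [PySem.Set.add, PySem.Set.contains]

lemma A_eq_flatMap (colors : List String) :
    ColorCodeSortedIndices colors = (PySem.Set.ofList colors).flatMap (idxsOf colors) := by
  unfold ColorCodeSortedIndices
  simp only [A_port_eq]
  have he : (fun (out : List Int) (c : String) =>
        List.foldl (fun out idx => if idx ∈ out then out else out ++ [idx]) out
          (List.map (fun p => p.1) (List.filter (fun p => p.2 == c) (PySem.List.enumerate colors))))
      = (fun out c => (idxsOf colors c).foldl
          (fun out idx => if idx ∈ out then out else out ++ [idx]) out) := rfl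
  rw [he, foldl_groups colors _ [] (PySem.Set.nodup_ofList colors) (by simp)]
  simp

lemma B_eq_flatMap (colors : List String) :
    ColorCodeSortedIndices_alt colors = (PySem.Set.ofList colors).flatMap (idxsOf colors) := by
  unfold ColorCodeSortedIndices_alt
  set groups := (PySem.List.enumerate colors).foldl
        (fun d p => d.modify p.2 [] (fun v => v ++ [p.1])) PySem.Dict.empty with hg
  have hkeys : groups.keys = PySem.Set.ofList colors := by
    rw [hg, PySem.Dict.keys_foldl_modify_key (key := fun (p : Int × String) => p.2)
      (f := fun d p => fun v => v ++ [p.1]) (d0 := []) (d := PySem.Dict.empty)]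
    simp [PySem.Dict.keys_empty, PySem.List.map_snd_enumerate]
    rfl
  have hnd : groups.keys.Nodup := by rw [hkeys]; exact PySem.Set.nodup_ofList colors
  have hget : ∀ c, groups.getD c [] = idxsOf colors c := by
    intro c
    have hswap : groups = ((PySem.List.enumerate colors).map (fun p => (p.2, p.1))).foldl
        (fun d p => d.modify p.1 [] (fun v => v ++ [p.2])) PySem.Dict.empty := by
      rw [hg, List.foldl_map]
    rw [hswap, PySem.Dict.getD_foldl_modify_append]
    rw [List.filter_map, List.map_map]
    simp [idxsOf, Function.comp_def, PySem.Dict.getD_empty]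
  rw [PySem.List.foldl_append_eq_flatten,
      PySem.Dict.values_eq_map_keys groups hnd []]
  rw [hkeys, List.nil_append]
  simp only [hget]
  rw [← List.flatMap_def]

-- ===== VERDICT (by name: the statement is the Claim_ definition above) =====
theorem ColorCodeSortedIndices_spec : Claim_equal_ColorCodeSortedIndices := by
  intro colors _
  unfold Spec_ColorCodeSortedIndices
  rw [A_eq_flatMap, B_eq_flatMap]
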